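-- pv_equiv track=rewrite | github.com/Ensembl/ensembl-metadata-api | src/ensembl/production/metadata/api/models/genome.py | _apply_consolidation_rules
-- ===== SOURCE A (Python) =====
-- def _apply_consolidation_rules(unique_dataset_types):
--     """
--     Apply consolidation rules to dataset types.
--
--     Args:
--         unique_dataset_types (set): A set of unique dataset types.
--
--     Returns:
--         set: A set of consolidated dataset types.
--     """
--     # Mapping dataset types to new consolidated types
--     consolidate_mapping = {
--         ('regulatory_features', 'regulation_build'): 'regulation',
--         ('evidence',): 'variation',
--         ('homology_load', 'homology_compute', 'homology_ftp'): 'homologies',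
--     }
--
--     # Apply consolidation rules
--     for types, corresponding_type in consolidate_mapping.items():
--         # if any of 'types' values are in unique_dataset_types
--         if unique_dataset_types.intersection(types):
--             # discard them
--             unique_dataset_types.difference_update(types)
--             # and add 'corresponding_type' value if it doesn't exist
--             unique_dataset_types.add(corresponding_type)
--
--     return unique_dataset_types
-- ===== SOURCE B (Python) =====
-- def _apply_consolidation_rules(unique_dataset_types):
--     """Consolidate dataset types via a flat element->replacement mapping (in place)."""
--     flat = {
--         'regulatory_features': 'regulation',
--         'regulation_build': 'regulation',
--         'evidence': 'variation',
--         'homology_load': 'homologies',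
--         'homology_compute': 'homologies',
--         'homology_ftp': 'homologies',
--     }
--     hits = {flat[t] for t in unique_dataset_types if t in flat}
--     consolidated = [t for t in unique_dataset_types if t not in flat]
--     for new_type in ('regulation', 'variation', 'homologies'):
--         if new_type in hits and new_type not in consolidated:
--             consolidated.append(new_type)
--     unique_dataset_types.clear()
--     unique_dataset_types.update(consolidated)
--     return unique_dataset_types
-- ===== Notes on version B (the rewrite author's own statement) =====
-- stated objective: idiomatic
-- what changed: A loops over the three consolidation groups doing a set intersection, a difference_update and an add per group; B builds a flat element-to-replacement dict once, computes the replacement set and the surviving non-key elements in single passes over the input, appends the missing consolidated names, and installs the result in place via clear()+update().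
import Mathlib
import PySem

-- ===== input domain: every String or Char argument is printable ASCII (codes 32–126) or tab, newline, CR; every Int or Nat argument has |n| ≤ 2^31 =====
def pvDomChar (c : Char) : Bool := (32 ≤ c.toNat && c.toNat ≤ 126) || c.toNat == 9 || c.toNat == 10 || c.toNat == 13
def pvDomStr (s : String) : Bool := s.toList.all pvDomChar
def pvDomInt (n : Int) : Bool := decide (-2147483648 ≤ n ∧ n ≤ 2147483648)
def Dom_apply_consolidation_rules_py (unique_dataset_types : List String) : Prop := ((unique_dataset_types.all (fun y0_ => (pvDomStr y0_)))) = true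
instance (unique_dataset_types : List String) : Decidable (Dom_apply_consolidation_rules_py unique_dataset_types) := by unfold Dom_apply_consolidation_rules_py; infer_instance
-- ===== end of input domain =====

-- B replaces A's per-group set intersection/difference passes with a flat element→replacement
-- dict, one filter pass plus a replacement set, then an in-place clear+update (idiomatic; same
-- return value and same argument mutation as A).

-- ===== PORT A =====
def pvConsolidateMapping : List (List String × String) :=
  [(["regulatory_features", "regulation_build"], "regulation"),
   (["evidence"], "variation"),
   (["homology_load", "homology_compute", "homology_ftp"], "homologies")]

def apply_consolidation_rules_py (unique_dataset_types : List String) : List String :=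
  pvConsolidateMapping.foldl
    (fun s gc =>
      if PySem.Set.inter s gc.1 ≠ [] then
        PySem.Set.add (PySem.Set.diff s gc.1) gc.2
      else s)
    unique_dataset_types

-- ===== PORT B =====
def pvFlat : PySem.Dict String String :=
  PySem.Dict.ofList
    [("regulatory_features", "regulation"), ("regulation_build", "regulation"),
     ("evidence", "variation"),
     ("homology_load", "homologies"), ("homology_compute", "homologies"),
     ("homology_ftp", "homologies")]

def apply_consolidation_rules_py_alt (unique_dataset_types : List String) : List String :=
  let hits : PySem.Set String := unique_dataset_types.foldl
    (fun h t => match PySem.Dict.get? pvFlat t with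
      | some v => PySem.Set.add h v
      | none => h) PySem.Set.empty
  let consolidated0 := unique_dataset_types.filter (fun t => !(PySem.Dict.contains pvFlat t))
  let consolidated := ["regulation", "variation", "homologies"].foldl
    (fun acc v => if PySem.Set.contains hits v && !(List.contains acc v) then acc ++ [v] else acc)
    consolidated0
  PySem.Set.ofList consolidated

-- ===== PRECONDITION & SPEC =====
-- The argument models a Python set, so its elements are distinct; Pre_ excludes only
-- duplicate-bearing lists, which represent no Python set at all (A never receives them).
def Pre_apply_consolidation_rules_py (unique_dataset_types : List String) : Prop :=
  unique_dataset_types.Nodup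
instance (unique_dataset_types : List String) : Decidable (Pre_apply_consolidation_rules_py unique_dataset_types) := by unfold Pre_apply_consolidation_rules_py; infer_instance

def pvWitness_apply_consolidation_rules_py : List String := ["evidence", "genebuild", "homology_load"]

def Spec_apply_consolidation_rules_py (unique_dataset_types : List String) (out : List String) : Prop := out = apply_consolidation_rules_py_alt unique_dataset_types
instance (unique_dataset_types : List String) (out : List String) : Decidable (Spec_apply_consolidation_rules_py unique_dataset_types out) := by unfold Spec_apply_consolidation_rules_py; infer_instance

-- ===== CLAIM (what is proved, stated in full; the proofs are below) =====
def Claim_equal_apply_consolidation_rules_py : Prop := ∀ (unique_dataset_types : List String), Dom_apply_consolidation_rules_py unique_dataset_types → Pre_apply_consolidation_rules_py unique_dataset_types → Spec_apply_consolidation_rules_py unique_dataset_types (apply_consolidation_rules_py unique_dataset_types)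

-- ===== LEMMAS AND PROOFS =====

-- One pass of A's loop, as a standalone function (A's fold body applied to one mapping entry).
def pvStep (g : List String) (c : String) (s : List String) : List String :=
  if PySem.Set.inter s g ≠ [] then PySem.Set.add (PySem.Set.diff s g) c else s

-- the six consolidated keys, as one boolean predicate
def pvKey (t : String) : Bool :=
  t == "regulatory_features" || t == "regulation_build" || t == "evidence" ||
  t == "homology_load" || t == "homology_compute" || t == "homology_ftp"

-- the group-removal predicates produced by A's three passes
def pq1 : String → Bool := fun x => !(["regulatory_features", "regulation_build"] : List String).contains x
def pq2 : String → Bool := fun x => !(["evidence"] : List String).contains x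
def pq12 : String → Bool := fun a => pq2 a && pq1 a

-- the conditional one-element tails both programs append, as functions of the input
def pt1 (u : List String) : List String :=
  if ("regulatory_features" ∈ u ∨ "regulation_build" ∈ u) ∧ "regulation" ∉ u then ["regulation"] else []
def pt2 (u : List String) : List String :=
  if "evidence" ∈ u ∧ "variation" ∉ u then ["variation"] else []
def pt3 (u : List String) : List String :=
  if ("homology_load" ∈ u ∨ "homology_compute" ∈ u ∨ "homology_ftp" ∈ u) ∧ "homologies" ∉ u then ["homologies"] else []

-- canonical value both programs compute: the non-key elements in input order, then the
-- consolidated names in mapping order, each appended iff its group was hit and it is new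
def pvCanon (u : List String) : List String :=
  ((u.filter (fun t => !pvKey t) ++ pt1 u) ++ pt2 u) ++ pt3 u

lemma mem_iteTail {x c : String} {b : Prop} [Decidable b] :
    (x ∈ (if b then [c] else ([] : List String))) ↔ b ∧ x = c := by
  split_ifs with h <;> simp [h]

lemma pvStep_char (g : List String) (c : String) (s : List String) (hcg : c ∉ g) :
    pvStep g c s = if ∃ x ∈ s, x ∈ g then
        s.filter (fun x => !g.contains x) ++ (if c ∈ s then [] else [c])
      else s := by
  simp only [pvStep, PySem.Set.inter, PySem.Set.diff, PySem.Set.add, PySem.Set.contains]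
  by_cases h : ∃ x ∈ s, x ∈ g
  · rw [if_pos h]
    have hne : s.filter (fun x => g.contains x) ≠ [] := by
      obtain ⟨x, hx, hxg⟩ := h
      intro hnil
      have := List.filter_eq_nil_iff.mp hnil x hx
      simp at this
      exact this hxg
    rw [if_pos hne]
    have hc : (List.filter (fun x => !g.contains x) s).contains c = decide (c ∈ s) := by
      simp [List.mem_filter, hcg]
    rw [hc]
    by_cases hcs : c ∈ s <;> simp [hcs]
  · rw [if_neg h, if_neg]
    simp only [ne_eq, not_not, List.filter_eq_nil_iff]
    intro a ha
    simp only [List.contains_eq_mem, decide_eq_true_eq]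
    intro hag
    exact h ⟨a, ha, hag⟩

lemma pvStep_canon (g : List String) (c : String) (s : List String) (hcg : c ∉ g) :
    pvStep g c s =
      s.filter (fun x => !g.contains x) ++ (if (∃ x ∈ s, x ∈ g) ∧ c ∉ s then [c] else []) := by
  rw [pvStep_char _ _ _ hcg]
  by_cases h : ∃ x ∈ s, x ∈ g
  · by_cases hc : c ∈ s <;> simp [h, hc]
  · have hself : s.filter (fun x => !g.contains x) = s := by
      rw [List.filter_eq_self]
      intro a ha
      simp only [List.contains_eq_mem, Bool.not_eq_eq_eq_not, Bool.not_true, decide_eq_false_iff_not]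
      intro hag
      exact h ⟨a, ha, hag⟩
    simp only [List.contains_eq_mem] at hself
    simp [h, hself]

lemma A_eq_steps (u : List String) :
    apply_consolidation_rules_py u =
      pvStep ["homology_load", "homology_compute", "homology_ftp"] "homologies"
        (pvStep ["evidence"] "variation"
          (pvStep ["regulatory_features", "regulation_build"] "regulation" u)) := rfl

lemma lemA1 (u : List String) :
    pvStep ["regulatory_features", "regulation_build"] "regulation" u = u.filter pq1 ++ pt1 u := by
  rw [pvStep_canon _ _ _ (by decide)]
  have h : (∃ x ∈ u, x ∈ (["regulatory_features", "regulation_build"] : List String)) ↔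
      ("regulatory_features" ∈ u ∨ "regulation_build" ∈ u) := by
    simp [and_or_left, exists_or]
  simp only [h]
  rfl

lemma lemA2 (u : List String) :
    pvStep ["evidence"] "variation" (u.filter pq1 ++ pt1 u) =
      (u.filter pq12 ++ pt1 u) ++ pt2 u := by
  rw [pvStep_canon _ _ _ (by decide)]
  have hf : (u.filter pq1 ++ pt1 u).filter (fun x => !(["evidence"] : List String).contains x) =
      u.filter pq12 ++ pt1 u := by
    rw [List.filter_append, List.filter_filter]
    refine congrArg₂ (· ++ ·) rfl ?_
    simp only [pt1]
    split_ifs <;> decide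
  have hc : ((∃ x ∈ u.filter pq1 ++ pt1 u, x ∈ (["evidence"] : List String)) ∧
        "variation" ∉ u.filter pq1 ++ pt1 u) ↔ ("evidence" ∈ u ∧ "variation" ∉ u) := by
    simp [pq1, pt1, List.mem_filter, List.mem_append]
  rw [hf]
  simp only [pt2, hc]

lemma lemA3 (u : List String) :
    pvStep ["homology_load", "homology_compute", "homology_ftp"] "homologies"
        ((u.filter pq12 ++ pt1 u) ++ pt2 u) = pvCanon u := by
  rw [pvStep_canon _ _ _ (by decide)]
  have hf : ((u.filter pq12 ++ pt1 u) ++ pt2 u).filter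
        (fun x => !(["homology_load", "homology_compute", "homology_ftp"] : List String).contains x) =
      (u.filter (fun t => !pvKey t) ++ pt1 u) ++ pt2 u := by
    rw [List.filter_append, List.filter_append, List.filter_filter]
    refine congrArg₂ (· ++ ·) (congrArg₂ (· ++ ·) ?_ ?_) ?_
    · apply List.filter_congr
      intro x hx
      rw [Bool.eq_iff_iff]
      simp [pq12, pq1, pq2, pvKey]
      tauto
    · simp only [pt1]
      split_ifs <;> decide
    · simp only [pt2]
      split_ifs <;> decide
  have hc : ((∃ x ∈ (u.filter pq12 ++ pt1 u) ++ pt2 u,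
          x ∈ (["homology_load", "homology_compute", "homology_ftp"] : List String)) ∧
        "homologies" ∉ (u.filter pq12 ++ pt1 u) ++ pt2 u) ↔
      (("homology_load" ∈ u ∨ "homology_compute" ∈ u ∨ "homology_ftp" ∈ u) ∧ "homologies" ∉ u) := by
    simp [pq12, pq1, pq2, pt1, pt2, List.mem_filter, List.mem_append,
      and_or_left, exists_or]
  rw [hf]
  simp only [pvCanon, pt3, hc]

lemma A_canon (u : List String) : apply_consolidation_rules_py u = pvCanon u := by
  rw [A_eq_steps, lemA1, lemA2, lemA3]

-- ----- B side -----

lemma items_pvFlat : pvFlat.items =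
    [("regulatory_features", "regulation"), ("regulation_build", "regulation"),
     ("evidence", "variation"),
     ("homology_load", "homologies"), ("homology_compute", "homologies"),
     ("homology_ftp", "homologies")] := by rfl

lemma get?_pvFlat (t : String) : PySem.Dict.get? pvFlat t =
    if t = "regulatory_features" ∨ t = "regulation_build" then some "regulation"
    else if t = "evidence" then some "variation"
    else if t = "homology_load" ∨ t = "homology_compute" ∨ t = "homology_ftp" then some "homologies"
    else none := by
  by_cases h1 : "regulatory_features" = t
  · subst h1; decide
  by_cases h2 : "regulation_build" = t
  · subst h2; decide
  by_cases h3 : "evidence" = t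
  · subst h3; decide
  by_cases h4 : "homology_load" = t
  · subst h4; decide
  by_cases h5 : "homology_compute" = t
  · subst h5; decide
  by_cases h6 : "homology_ftp" = t
  · subst h6; decide
  have e1 : ("regulatory_features" == t) = false := by simp [h1]
  have e2 : ("regulation_build" == t) = false := by simp [h2]
  have e3 : ("evidence" == t) = false := by simp [h3]
  have e4 : ("homology_load" == t) = false := by simp [h4]
  have e5 : ("homology_compute" == t) = false := by simp [h5]
  have e6 : ("homology_ftp" == t) = false := by simp [h6]
  have hn : PySem.Dict.get? pvFlat t = none := by
    simp [PySem.Dict.get?, items_pvFlat, List.find?, e1, e2, e3, e4, e5, e6]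
  rw [hn, if_neg, if_neg, if_neg]
  · rintro (h | h | h)
    · exact h4 h.symm
    · exact h5 h.symm
    · exact h6 h.symm
  · intro h; exact h3 h.symm
  · rintro (h | h)
    · exact h1 h.symm
    · exact h2 h.symm

lemma get?_eq_reg (t : String) :
    PySem.Dict.get? pvFlat t = some "regulation" ↔
      (t = "regulatory_features" ∨ t = "regulation_build") := by
  rw [get?_pvFlat]
  split_ifs with hA hB hC
  · simp [hA]
  · rcases em (t = "regulatory_features" ∨ t = "regulation_build") with h | h
    · exact absurd h hA
    · simp [h]
  · rcases hC with rfl | rfl | rfl <;> decide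
  · simp [hA]

lemma get?_eq_var (t : String) :
    PySem.Dict.get? pvFlat t = some "variation" ↔ t = "evidence" := by
  rw [get?_pvFlat]
  split_ifs with hA hB hC
  · rcases hA with rfl | rfl <;> decide
  · simp [hB]
  · rcases hC with rfl | rfl | rfl <;> decide
  · simp [hB]

lemma get?_eq_hom (t : String) :
    PySem.Dict.get? pvFlat t = some "homologies" ↔
      (t = "homology_load" ∨ t = "homology_compute" ∨ t = "homology_ftp") := by
  rw [get?_pvFlat]
  split_ifs with hA hB hC
  · rcases hA with rfl | rfl <;> decide
  · subst hB; decide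
  · simp [hC]
  · simp [hC]

lemma contains_pvFlat (t : String) : PySem.Dict.contains pvFlat t = pvKey t := by
  rw [Bool.eq_iff_iff]
  simp only [PySem.Dict.contains, items_pvFlat, List.any_cons, List.any_nil, Bool.or_eq_true,
    beq_iff_eq, pvKey, Bool.false_eq_true, or_false]
  constructor
  · rintro (h | h | h | h | h | h) <;> subst h <;> decide
  · rintro (((((h | h) | h) | h) | h) | h) <;> subst h <;> decide

lemma mem_hits (u : List String) (h : PySem.Set String) (v : String) :
    v ∈ u.foldl
        (fun h t => match PySem.Dict.get? pvFlat t with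
          | some w => PySem.Set.add h w
          | none => h) h ↔
      v ∈ h ∨ ∃ t ∈ u, PySem.Dict.get? pvFlat t = some v := by
  induction u generalizing h with
  | nil => simp
  | cons a l ih =>
    simp only [List.foldl_cons]
    rcases hg : PySem.Dict.get? pvFlat a with _ | w
    · rw [ih]; simp [hg]
    · rw [ih]
      simp only [PySem.Set.mem_add, List.mem_cons]
      constructor
      · rintro (⟨hv | hv⟩ | ⟨t, ht, hgt⟩)
        · exact Or.inl hv
        · exact Or.inr ⟨a, Or.inl rfl, hv ▸ hg⟩
        · exact Or.inr ⟨t, Or.inr ht, hgt⟩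
      · rintro (hv | ⟨t, (rfl | ht), hgt⟩)
        · exact Or.inl (Or.inl hv)
        · rw [hg] at hgt
          exact Or.inl (Or.inr (Option.some.inj hgt).symm)
        · exact Or.inr ⟨t, ht, hgt⟩

-- membership of the three consolidated names in B's replacement set
lemma hits_reg (u : List String) :
    PySem.Set.contains
        (u.foldl
          (fun h t => match PySem.Dict.get? pvFlat t with
            | some w => PySem.Set.add h w
            | none => h) PySem.Set.empty) "regulation" =
      decide ("regulatory_features" ∈ u ∨ "regulation_build" ∈ u) := by
  rw [Bool.eq_iff_iff]
  simp only [PySem.Set.contains, List.contains_eq_mem, decide_eq_true_eq]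
  rw [mem_hits]
  simp [PySem.Set.empty, get?_eq_reg, and_or_left, exists_or]

lemma hits_var (u : List String) :
    PySem.Set.contains
        (u.foldl
          (fun h t => match PySem.Dict.get? pvFlat t with
            | some w => PySem.Set.add h w
            | none => h) PySem.Set.empty) "variation" =
      decide ("evidence" ∈ u) := by
  rw [Bool.eq_iff_iff]
  simp only [PySem.Set.contains, List.contains_eq_mem, decide_eq_true_eq]
  rw [mem_hits]
  simp [PySem.Set.empty, get?_eq_var]

lemma hits_hom (u : List String) :
    PySem.Set.contains
        (u.foldl
          (fun h t => match PySem.Dict.get? pvFlat t with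
            | some w => PySem.Set.add h w
            | none => h) PySem.Set.empty) "homologies" =
      decide ("homology_load" ∈ u ∨ "homology_compute" ∈ u ∨ "homology_ftp" ∈ u) := by
  rw [Bool.eq_iff_iff]
  simp only [PySem.Set.contains, List.contains_eq_mem, decide_eq_true_eq]
  rw [mem_hits]
  simp [PySem.Set.empty, get?_eq_hom, and_or_left, exists_or]

lemma canon_pre_nodup (u : List String) (hu : u.Nodup) :
    (((u.filter (fun t => !pvKey t) ++ pt1 u) ++ pt2 u) ++ pt3 u).Nodup := by
  rw [List.append_assoc, List.append_assoc]
  apply List.Nodup.append (hu.filter _)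
  · simp only [pt1, pt2, pt3]
    split_ifs <;> decide
  · intro a ha hb
    have hau : a ∈ u := (List.mem_filter.mp ha).1
    simp only [pt1, pt2, pt3, List.mem_append, mem_iteTail] at hb
    rcases hb with ⟨⟨_, hn⟩, rfl⟩ | ⟨⟨_, hn⟩, rfl⟩ | ⟨⟨_, hn⟩, rfl⟩ <;> exact hn hau

lemma B_canon (u : List String) (hu : u.Nodup) :
    apply_consolidation_rules_py_alt u = pvCanon u := by
  have hfk : u.filter (fun t => !(PySem.Dict.contains pvFlat t)) = u.filter (fun t => !pvKey t) :=
    List.filter_congr fun x _ => by rw [contains_pvFlat]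
  have hmr : (u.filter (fun t => !(PySem.Dict.contains pvFlat t))).contains "regulation" =
      decide ("regulation" ∈ u) := by
    rw [hfk, List.contains_eq_mem, decide_eq_decide]
    simp [List.mem_filter, pvKey]
  have hmv : (u.filter (fun t => !pvKey t) ++ pt1 u).contains "variation" =
      decide ("variation" ∈ u) := by
    rw [List.contains_eq_mem, decide_eq_decide]
    simp [List.mem_append, List.mem_filter, pt1, pvKey]
  have hmh : ((u.filter (fun t => !pvKey t) ++ pt1 u) ++ pt2 u).contains "homologies" =
      decide ("homologies" ∈ u) := by
    rw [List.contains_eq_mem, decide_eq_decide]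
    simp [List.mem_append, List.mem_filter, pt1, pt2, pvKey]
  simp only [apply_consolidation_rules_py_alt, List.foldl_cons, List.foldl_nil,
    hits_reg, hits_var, hits_hom]
  have s1 : (if (decide ("regulatory_features" ∈ u ∨ "regulation_build" ∈ u) &&
        !(u.filter (fun t => !(PySem.Dict.contains pvFlat t))).contains "regulation") = true then
        u.filter (fun t => !(PySem.Dict.contains pvFlat t)) ++ ["regulation"]
      else u.filter (fun t => !(PySem.Dict.contains pvFlat t))) =
      u.filter (fun t => !pvKey t) ++ pt1 u := by
    rw [hmr, hfk]
    simp only [pt1]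
    by_cases h : ("regulatory_features" ∈ u ∨ "regulation_build" ∈ u) <;>
      by_cases hm : "regulation" ∈ u <;> simp [h, hm]
  rw [s1]
  have s2 : (if (decide ("evidence" ∈ u) &&
        !(u.filter (fun t => !pvKey t) ++ pt1 u).contains "variation") = true then
        (u.filter (fun t => !pvKey t) ++ pt1 u) ++ ["variation"]
      else u.filter (fun t => !pvKey t) ++ pt1 u) =
      (u.filter (fun t => !pvKey t) ++ pt1 u) ++ pt2 u := by
    rw [hmv]
    simp only [pt2]
    by_cases h : ("evidence" ∈ u) <;> by_cases hm : "variation" ∈ u <;> simp [h, hm]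
  rw [s2]
  have s3 : (if (decide ("homology_load" ∈ u ∨ "homology_compute" ∈ u ∨ "homology_ftp" ∈ u) &&
        !((u.filter (fun t => !pvKey t) ++ pt1 u) ++ pt2 u).contains "homologies") = true then
        ((u.filter (fun t => !pvKey t) ++ pt1 u) ++ pt2 u) ++ ["homologies"]
      else (u.filter (fun t => !pvKey t) ++ pt1 u) ++ pt2 u) =
      ((u.filter (fun t => !pvKey t) ++ pt1 u) ++ pt2 u) ++ pt3 u := by
    rw [hmh]
    simp only [pt3]
    by_cases h : ("homology_load" ∈ u ∨ "homology_compute" ∈ u ∨ "homology_ftp" ∈ u) <;>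
      by_cases hm : "homologies" ∈ u <;> simp [h, hm]
  rw [s3]
  rw [PySem.Set.ofList_eq_self_of_nodup _ (canon_pre_nodup u hu)]
  rfl

-- ===== VERDICT (by name: the statement is the Claim_ definition above) =====
theorem apply_consolidation_rules_py_spec : Claim_equal_apply_consolidation_rules_py := by
  intro u _ hpre
  unfold Spec_apply_consolidation_rules_py
  rw [A_canon, B_canon u hpre]
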